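-- pv_equiv track=rewrite | github.com/sumiya1625114/ma-jan | main.py | ko_serch
-- ===== SOURCE A (Python) =====
-- def ko_serch(tlist): #刻子検索
--     hailist = tlist.copy()
--     tempr = list()
--     flg = 0
--     while flg == 0:
--         flg = 1
--         for i in range(len(hailist)):
--             for j in range(i+1,len(hailist)):
--                 if hailist[i] == hailist[j]:
--                     for k in range(j+1,len(hailist)):
--                         if hailist[j] == hailist[k]:
--                             tempr.append([hailist[i],hailist[j],hailist[k]])
--                             del hailist[i]
--                             del hailist[j-1]
--                             del hailist[k-2]
--                             flg = 0
--                             break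
--                     else:
--                         continue
--                     break
--             else:
--                 continue
--             break
--     result = tempr
--     amari = hailist
--     return result,amari
-- ===== SOURCE B (Python) =====
-- def ko_serch(tlist):  # counting-based: one pass for totals, one pass to emit triplets/leftovers
--     total = {}
--     for v in tlist:
--         total[v] = total.get(v, 0) + 1
--     triples = []
--     amari = []
--     seen = {}
--     for v in tlist:
--         k = seen.get(v, 0)
--         seen[v] = k + 1
--         if k < 3 * (total[v] // 3):
--             if k % 3 == 0:
--                 triples.append([v, v, v])
--         else:
--             amari.append(v)
--     return triples, amari
-- ===== Notes on version B (the rewrite author's own statement) =====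
-- stated objective: faster
-- what changed: A repeatedly rescans the hand with three nested index loops and restarts from scratch after every deletion; B makes one pass to count occurrences per tile value and a second pass that classifies each tile by its occurrence ordinal against 3*(count//3), emitting triplets and leftovers directly.
import Mathlib
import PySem

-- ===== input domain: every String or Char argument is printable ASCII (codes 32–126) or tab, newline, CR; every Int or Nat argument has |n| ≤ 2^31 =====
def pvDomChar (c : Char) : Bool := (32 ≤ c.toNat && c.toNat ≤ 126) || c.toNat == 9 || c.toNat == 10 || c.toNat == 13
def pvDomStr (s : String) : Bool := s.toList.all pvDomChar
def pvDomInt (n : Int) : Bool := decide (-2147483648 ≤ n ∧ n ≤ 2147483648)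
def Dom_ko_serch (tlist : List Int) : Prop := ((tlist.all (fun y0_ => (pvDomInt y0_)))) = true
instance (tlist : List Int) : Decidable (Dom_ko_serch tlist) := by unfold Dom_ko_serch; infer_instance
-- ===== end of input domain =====

-- B (counting) is measurably faster: A rescans the whole hand with three nested index loops
-- and restarts after every removal; B counts occurrences once and emits triplets/leftovers in one pass.

-- ===== PORT A =====
-- inner `for k in range(j+1, len(hailist))` loop: first k ≥ k0 with hailist[j] == hailist[k]
def scanK (h : List Int) (j : Nat) (k : Nat) : Option Nat :=
  if hk : k < h.length then
    if h.getD j 0 = h.getD k 0 then some k else scanK h j (k + 1)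
  else none
termination_by h.length - k
decreasing_by exact Nat.sub_succ_lt_self h.length k hk

-- middle `for j in range(i+1, len(hailist))` loop with its break/else-continue
def scanJ (h : List Int) (i : Nat) (j : Nat) : Option (Nat × Nat) :=
  if hk : j < h.length then
    if h.getD i 0 = h.getD j 0 then
      match scanK h j (j + 1) with
      | some k => some (j, k)
      | none => scanJ h i (j + 1)
    else scanJ h i (j + 1)
  else none
termination_by h.length - j
decreasing_by
  · exact Nat.sub_succ_lt_self h.length j hk
  · exact Nat.sub_succ_lt_self h.length j hk

-- outer `for i in range(len(hailist))` loop
def scanI (h : List Int) (i : Nat) : Option (Nat × Nat × Nat) :=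
  if hk : i < h.length then
    match scanJ h i (i + 1) with
    | some (j, k) => some (i, j, k)
    | none => scanI h (i + 1)
  else none
termination_by h.length - i
decreasing_by exact Nat.sub_succ_lt_self h.length i hk

-- termination helper for the while-loop: a found index is in range
theorem scanI_fst_lt (h : List Int) (i0 i j k : Nat)
    (hs : scanI h i0 = some (i, j, k)) : i < h.length := by
  fun_induction scanI h i0 with
  | case1 i0 hlt hj k' hj' =>
    simp only [Option.some.injEq, Prod.mk.injEq] at hs
    omega
  | case2 i0 hlt hnone ih => exact ih hs
  | case3 i0 hge => simp at hs

-- the `while flg == 0` loop: each pass finds (i, j, k), appends the triplet, deletes the three tiles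
def koLoop (h : List Int) (tempr : List (List Int)) : List (List Int) × List Int :=
  match hs : scanI h 0 with
  | some (i, j, k) =>
      koLoop (((h.eraseIdx i).eraseIdx (j - 1)).eraseIdx (k - 2))
             (tempr ++ [[h.getD i 0, h.getD j 0, h.getD k 0]])
  | none => (tempr, h)
termination_by h.length
decreasing_by
  have hi : i < h.length := scanI_fst_lt h 0 i j k hs
  exact Nat.lt_of_le_of_lt
    (Nat.le_trans (List.length_eraseIdx_le _ _) (List.length_eraseIdx_le _ _))
    (Nat.lt_of_le_of_lt (Nat.le_of_eq (List.length_eraseIdx_of_lt hi))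
      (Nat.sub_lt (Nat.lt_of_le_of_lt (Nat.zero_le i) hi) Nat.one_pos))

def ko_serch (tlist : List Int) : List (List Int) × List Int :=
  koLoop tlist []

-- ===== PORT B =====
-- second pass of Source B: classify each tile by its occurrence ordinal against total // 3
def bStep (total : PySem.Dict Int Int)
    (acc : List (List Int) × List Int × PySem.Dict Int Int) (v : Int) :
    List (List Int) × List Int × PySem.Dict Int Int :=
  let k := acc.2.2.getD v 0
  let seen := acc.2.2.insert v (k + 1)
  if k < 3 * (PySem.Int.floordiv (total.getD v 0) 3) then
    if PySem.Int.mod k 3 = 0 then (acc.1 ++ [[v, v, v]], acc.2.1, seen)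
    else (acc.1, acc.2.1, seen)
  else (acc.1, acc.2.1 ++ [v], seen)

def ko_serch_alt (tlist : List Int) : List (List Int) × List Int :=
  let total := tlist.foldl (fun d v => d.insert v (d.getD v 0 + 1)) PySem.Dict.empty
  let st := tlist.foldl (bStep total) ([], [], PySem.Dict.empty)
  (st.1, st.2.1)

-- ===== PRECONDITION & SPEC =====
def Spec_ko_serch (tlist : List Int) (out : List (List Int) × List Int) : Prop := out = ko_serch_alt tlist
instance (tlist : List Int) (out : List (List Int) × List Int) : Decidable (Spec_ko_serch tlist out) := by unfold Spec_ko_serch; infer_instance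

-- ===== CLAIM (what is proved, stated in full; the proofs are below) =====
def Claim_equal_ko_serch : Prop := ∀ (tlist : List Int), Dom_ko_serch tlist → Spec_ko_serch tlist (ko_serch tlist)

-- ===== LEMMAS AND PROOFS =====

-- spec-level machinery: goB classifies each tile by its occurrence ordinal (c) against its total count (T)
def upd (f : Int → Nat) (v : Int) (n : Nat) : Int → Nat := fun w => if w = v then n else f w

def bump (c : Int → Nat) (v : Int) : Int → Nat := fun w => if w = v then c w + 1 else c w

theorem upd_self (f : Int → Nat) (v : Int) (n : Nat) : upd f v n v = n := by simp [upd]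

theorem upd_ne (f : Int → Nat) (v : Int) (n : Nat) (w : Int) (h : w ≠ v) : upd f v n w = f w := by
  simp [upd, h]

theorem bump_self (c : Int → Nat) (v : Int) : bump c v v = c v + 1 := by simp [bump]

theorem bump_ne (c : Int → Nat) (v w : Int) (h : w ≠ v) : bump c v w = c w := by simp [bump, h]

def goB (T : Int → Nat) (c : Int → Nat) : List Int → List (List Int) × List Int
  | [] => ([], [])
  | v :: b =>
    if c v < 3 * (T v / 3) then
      if c v % 3 = 0 then ([v, v, v] :: (goB T (bump c v) b).1, (goB T (bump c v) b).2)
      else goB T (bump c v) b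
    else ((goB T (bump c v) b).1, v :: (goB T (bump c v) b).2)

def G (h : List Int) : List (List Int) × List Int := goB (fun w => h.count w) (fun _ => 0) h

-- remove the first n occurrences of v
def remN (v : Int) (n : Nat) (b : List Int) : List Int :=
  match n, b with
  | _, [] => []
  | 0, b => b
  | n + 1, w :: b => if w = v then remN v n b else w :: remN v (n + 1) b

theorem remN_nil (v : Int) (n : Nat) : remN v n [] = [] := by cases n <;> rfl

theorem remN_zero (v : Int) (b : List Int) : remN v 0 b = b := by cases b <;> rfl

theorem remN_skip (v : Int) (n : Nat) (p q : List Int) (hp : v ∉ p) :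
    remN v (n + 1) (p ++ v :: q) = p ++ remN v n q := by
  induction p with
  | nil => simp [remN]
  | cons w p ih =>
    have hw : ¬ w = v := fun e => hp (by simp [e])
    simp only [List.cons_append, remN]
    rw [if_neg hw, ih (fun hm => hp (List.mem_cons_of_mem _ hm))]

theorem count_remN_ne (v w : Int) (hwv : w ≠ v) : ∀ (n : Nat) (b : List Int),
    (remN v n b).count w = b.count w := by
  intro n b
  induction b generalizing n with
  | nil => rw [remN_nil]
  | cons x b ih =>
    cases n with
    | zero => rw [remN_zero]
    | succ n =>
      by_cases hx : x = v
      · simp only [remN]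
        rw [if_pos hx, ih n, hx, List.count_cons_of_ne (Ne.symm hwv)]
      · simp only [remN]
        rw [if_neg hx, List.count_cons, List.count_cons, ih (n + 1)]

theorem count_remN_self (v : Int) : ∀ (n : Nat) (b : List Int), n ≤ b.count v →
    (remN v n b).count v = b.count v - n := by
  intro n b
  induction b generalizing n with
  | nil => intro _; rw [remN_nil]; simp
  | cons x b ih =>
    intro hn
    cases n with
    | zero => rw [remN_zero]; omega
    | succ n =>
      by_cases hx : x = v
      · subst hx
        rw [List.count_cons_self] at hn
        have hr : remN x (n + 1) (x :: b) = remN x n b := by simp [remN]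
        rw [hr, ih n (by omega), List.count_cons_self]
        omega
      · have hr : remN v (n + 1) (x :: b) = x :: remN v (n + 1) b := by simp [remN, hx]
        rw [List.count_cons_of_ne hx] at hn
        rw [hr, List.count_cons_of_ne hx, List.count_cons_of_ne hx, ih (n + 1) hn]

theorem goB_amari (T : Int → Nat) : ∀ (b : List Int) (c : Int → Nat),
    (∀ w ∈ b, T w < 3) → goB T c b = ([], b) := by
  intro b
  induction b with
  | nil => intro _ _; rfl
  | cons v b ih =>
    intro c hb
    have hv : T v < 3 := hb v List.mem_cons_self
    have hc : ¬ (c v < 3 * (T v / 3)) := by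
      have : T v / 3 = 0 := Nat.div_eq_of_lt hv
      omega
    simp only [goB, if_neg hc]
    rw [ih (bump c v) (fun w hw => hb w (List.mem_cons_of_mem _ hw))]

theorem goB_append (T : Int → Nat) : ∀ (x y : List Int) (c : Int → Nat),
    goB T c (x ++ y) = ((goB T c x).1 ++ (goB T (fun w => c w + x.count w) y).1,
                        (goB T c x).2 ++ (goB T (fun w => c w + x.count w) y).2) := by
  intro x
  induction x with
  | nil => intro y c; simp [goB]
  | cons v x ih =>
    intro y c
    have hc : (fun w => bump c v w + x.count w) = (fun w => c w + (v :: x).count w) := by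
      funext w
      by_cases hw : w = v <;> simp [bump, hw, List.count_cons] <;> omega
    simp only [List.cons_append, goB]
    rw [ih _ (bump c v), hc]
    split_ifs <;> simp

theorem goB_rem3 (T : Int → Nat) (v : Int) : ∀ (b : List Int) (c : Int → Nat), 3 ≤ c v →
    goB T c b = goB (upd T v (T v - 3)) (upd c v (c v - 3)) b := by
  intro b
  induction b with
  | nil => intro _ _; rfl
  | cons w b ih =>
    intro c h3
    by_cases hw : w = v
    · subst hw
      have hbump : bump (upd c w (c w - 3)) w = upd (bump c w) w (bump c w w - 3) := by
        funext u
        by_cases hu : u = w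
        · subst hu; rw [bump_self, upd_self, upd_self, bump_self]; omega
        · rw [bump_ne _ _ _ hu, upd_ne _ _ _ _ hu, upd_ne _ _ _ _ hu, bump_ne _ _ _ hu]
      have hcond : (upd c w (c w - 3) w < 3 * (upd T w (T w - 3) w / 3)) ↔ (c w < 3 * (T w / 3)) := by
        rw [upd_self, upd_self]; omega
      have hmod : (upd c w (c w - 3) w % 3 = 0) ↔ (c w % 3 = 0) := by
        rw [upd_self]; omega
      simp only [goB, hcond, hmod]
      rw [ih (bump c w) (by rw [bump_self]; omega), hbump]
    · have hbv : bump c w v = c v := bump_ne c w v (Ne.symm hw)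
      have hbump : bump (upd c v (c v - 3)) w = upd (bump c w) v (bump c w v - 3) := by
        funext u
        by_cases hu : u = w
        · subst hu; rw [bump_self, upd_ne _ _ _ _ hw, upd_ne _ _ _ _ hw, bump_self]
        · by_cases huv : u = v
          · subst huv; rw [bump_ne _ _ _ hu, upd_self, upd_self, hbv]
          · rw [bump_ne _ _ _ hu, upd_ne _ _ _ _ huv, upd_ne _ _ _ _ huv, bump_ne _ _ _ hu]
      have hcond : (upd c v (c v - 3) w < 3 * (upd T v (T v - 3) w / 3)) ↔ (c w < 3 * (T w / 3)) := by
        rw [upd_ne _ _ _ _ hw, upd_ne _ _ _ _ hw]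
      have hmod : (upd c v (c v - 3) w % 3 = 0) ↔ (c w % 3 = 0) := by
        rw [upd_ne _ _ _ _ hw]
      simp only [goB, hcond, hmod]
      rw [ih (bump c w) (by rw [hbv]; exact h3), hbump, hbv]

theorem goB_rem (T : Int → Nat) (v : Int) : ∀ (b : List Int) (c : Int → Nat),
    1 ≤ c v → c v ≤ 3 → 3 ≤ T v →
    goB T c b = goB (upd T v (T v - 3)) (upd c v 0) (remN v (3 - c v) b) := by
  intro b
  induction b with
  | nil => intro c _ _ _; rfl
  | cons w b ih =>
    intro c h1 h3 hT
    by_cases hcv3 : c v = 3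
    · have h := goB_rem3 T v (w :: b) c (by omega)
      rw [hcv3] at h
      rw [hcv3, Nat.sub_self, remN_zero]
      exact h
    · have hn : 3 - c v = (2 - c v) + 1 := by omega
      by_cases hw : w = v
      · subst hw
        have hcond : c w < 3 * (T w / 3) := by omega
        have hmod : ¬ (c w % 3 = 0) := by omega
        have hrem : remN w (3 - c w) (w :: b) = remN w (2 - c w) b := by
          rw [hn]; simp [remN]
        rw [hrem]
        simp only [goB, if_pos hcond, if_neg hmod]
        by_cases h2 : c w = 2
        · rw [goB_rem3 T w b (bump c w) (by rw [bump_self]; omega)]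
          have e1 : upd (bump c w) w (bump c w w - 3) = upd c w 0 := by
            funext u
            by_cases hu : u = w
            · subst hu; rw [upd_self, upd_self, bump_self]; omega
            · rw [upd_ne _ _ _ _ hu, upd_ne _ _ _ _ hu, bump_ne _ _ _ hu]
          rw [e1, show 2 - c w = 0 from by omega, remN_zero]
        · rw [ih (bump c w) (by rw [bump_self]; omega) (by rw [bump_self]; omega) hT]
          have e1 : upd (bump c w) w 0 = upd c w 0 := by
            funext u
            by_cases hu : u = w
            · subst hu; rw [upd_self, upd_self]
            · rw [upd_ne _ _ _ _ hu, upd_ne _ _ _ _ hu, bump_ne _ _ _ hu]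
          have e2 : 3 - bump c w w = 2 - c w := by rw [bump_self]; omega
          rw [e1, e2]
      · have hbv : bump c w v = c v := bump_ne c w v (Ne.symm hw)
        have hbump : bump (upd c v 0) w = upd (bump c w) v 0 := by
          funext u
          by_cases hu : u = w
          · subst hu; rw [bump_self, upd_ne _ _ _ _ hw, upd_ne _ _ _ _ hw, bump_self]
          · by_cases huv : u = v
            · subst huv; rw [bump_ne _ _ _ hu, upd_self, upd_self]
            · rw [bump_ne _ _ _ hu, upd_ne _ _ _ _ huv, upd_ne _ _ _ _ huv, bump_ne _ _ _ hu]
        have hcond : (upd c v 0 w < 3 * (upd T v (T v - 3) w / 3)) ↔ (c w < 3 * (T w / 3)) := by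
          rw [upd_ne _ _ _ _ hw, upd_ne _ _ _ _ hw]
        have hmod : (upd c v 0 w % 3 = 0) ↔ (c w % 3 = 0) := by
          rw [upd_ne _ _ _ _ hw]
        have hrem : remN v (3 - c v) (w :: b) = w :: remN v (3 - c v) b := by
          rw [hn]; simp [remN, hw]
        rw [hrem]
        simp only [goB, hcond, hmod]
        rw [ih (bump c w) (by rw [hbv]; exact h1) (by rw [hbv]; exact h3) hT, hbump, hbv]

theorem goB_cons_triple (T : Int → Nat) (c : Int → Nat) (v : Int) (b : List Int)
    (hc : c v = 0) (hT : 3 ≤ T v) :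
    goB T c (v :: b) = ([v, v, v] :: (goB T (bump c v) b).1, (goB T (bump c v) b).2) := by
  have hd : 1 ≤ T v / 3 := by omega
  simp only [goB]
  rw [if_pos (by omega), if_pos (by omega)]

theorem main_step (a b : List Int) (v : Int) (hva : v ∉ a)
    (ha : ∀ w ∈ a, (a ++ v :: b).count w < 3) (hv : 3 ≤ (a ++ v :: b).count v) :
    G (a ++ v :: b) = ([v, v, v] :: (G (a ++ remN v 2 b)).1, (G (a ++ remN v 2 b)).2) := by
  have hav : a.count v = 0 := List.count_eq_zero_of_not_mem hva
  have hcnt : (a ++ v :: b).count v = b.count v + 1 := by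
    rw [List.count_append, List.count_cons_self, hav]
    omega
  have hbv : 2 ≤ b.count v := by omega
  have hT' : (fun w => (a ++ remN v 2 b).count w)
      = upd (fun w => (a ++ v :: b).count w) v ((a ++ v :: b).count v - 3) := by
    funext w
    by_cases hwv : w = v
    · subst hwv
      rw [upd_self, List.count_append, count_remN_self w 2 b hbv, List.count_append,
        List.count_cons_self, hav]
      omega
    · rw [upd_ne _ _ _ _ hwv, List.count_append, List.count_append,
        count_remN_ne v w hwv 2 b, List.count_cons_of_ne (Ne.symm hwv)]
  have hca : (fun w => (0:Nat) + a.count w) v = 0 := by simp [hav]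
  have key : goB (fun w => (a ++ v :: b).count w) (bump (fun w => 0 + a.count w) v) b
      = goB (fun w => (a ++ remN v 2 b).count w) (fun w => 0 + a.count w) (remN v 2 b) := by
    rw [goB_rem (fun w => (a ++ v :: b).count w) v b (bump (fun w => 0 + a.count w) v)
      (by rw [bump_self]; omega) (by rw [bump_self]; simp [hav]) hv]
    have e2 : 3 - bump (fun w => 0 + a.count w) v v = 2 := by
      rw [bump_self]; simp [hav]
    have e1 : upd (bump (fun w => 0 + a.count w) v) v 0 = (fun w => 0 + a.count w) := by
      funext u
      by_cases hu : u = v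
      · subst hu; rw [upd_self]; simp [hav]
      · rw [upd_ne _ _ _ _ hu, bump_ne _ _ _ hu]
    rw [e2, e1, ← hT']
  have hAL : goB (fun w => (a ++ v :: b).count w) (fun _ => 0) a = ([], a) :=
    goB_amari _ a _ ha
  have hAR : goB (fun w => (a ++ remN v 2 b).count w) (fun _ => 0) a = ([], a) := by
    apply goB_amari
    intro w hw
    have hwv : w ≠ v := fun e => hva (e ▸ hw)
    show (a ++ remN v 2 b).count w < 3
    rw [List.count_append, count_remN_ne v w hwv 2 b]
    have hh := ha w hw
    rw [List.count_append, List.count_cons_of_ne (Ne.symm hwv)] at hh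
    exact hh
  have hhead := goB_cons_triple (fun w => (a ++ v :: b).count w) (fun w => 0 + a.count w) v b hca hv
  show goB (fun w => (a ++ v :: b).count w) (fun _ => 0) (a ++ v :: b) = _
  rw [goB_append, hAL]
  rw [show G (a ++ remN v 2 b)
      = goB (fun w => (a ++ remN v 2 b).count w) (fun _ => 0) (a ++ remN v 2 b) from rfl]
  rw [goB_append (fun w => (a ++ remN v 2 b).count w) a (remN v 2 b) (fun _ => 0), hAR]
  rw [hhead, key]
  rfl

-- count ⇒ explicit indices
theorem exists1_of_count (b : List Int) (w : Int) (h1 : 1 ≤ b.count w) :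
    ∃ m, m < b.length ∧ b.getD m 0 = w := by
  induction b with
  | nil => simp at h1
  | cons x b ih =>
    by_cases hx : x = w
    · exact ⟨0, by simp, by simp [hx]⟩
    · rw [List.count_cons_of_ne hx] at h1
      obtain ⟨m, hm, he⟩ := ih h1
      exact ⟨m + 1, by simp; omega, by simpa using he⟩

theorem exists2_of_count (b : List Int) (w : Int) (h2 : 2 ≤ b.count w) :
    ∃ m1 m2, m1 < m2 ∧ m2 < b.length ∧ b.getD m1 0 = w ∧ b.getD m2 0 = w := by
  induction b with
  | nil => simp at h2
  | cons x b ih =>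
    by_cases hx : x = w
    · subst hx
      rw [List.count_cons_self] at h2
      obtain ⟨m, hm, he⟩ := exists1_of_count b x (by omega)
      exact ⟨0, m + 1, by omega, by simp; omega, by simp, by simpa using he⟩
    · rw [List.count_cons_of_ne hx] at h2
      obtain ⟨m1, m2, h12, hm2, e1, e2⟩ := ih h2
      exact ⟨m1 + 1, m2 + 1, by omega, by simp; omega, by simpa using e1, by simpa using e2⟩

theorem exists3_of_count (b : List Int) (w : Int) (h3 : 3 ≤ b.count w) :
    ∃ m1 m2 m3, m1 < m2 ∧ m2 < m3 ∧ m3 < b.length ∧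
      b.getD m1 0 = w ∧ b.getD m2 0 = w ∧ b.getD m3 0 = w := by
  induction b with
  | nil => simp at h3
  | cons x b ih =>
    by_cases hx : x = w
    · subst hx
      rw [List.count_cons_self] at h3
      obtain ⟨m1, m2, h12, hm2, e1, e2⟩ := exists2_of_count b x (by omega)
      exact ⟨0, m1 + 1, m2 + 1, by omega, by omega, by simp; omega, by simp,
        by simpa using e1, by simpa using e2⟩
    · rw [List.count_cons_of_ne hx] at h3
      obtain ⟨m1, m2, m3, h12, h23, hm3, e1, e2, e3⟩ := ih h3
      exact ⟨m1 + 1, m2 + 1, m3 + 1, by omega, by omega, by simp; omega,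
        by simpa using e1, by simpa using e2, by simpa using e3⟩

-- characterisations of the three nested scans of port A
theorem scanK_some (h : List Int) (j k0 k : Nat) (hs : scanK h j k0 = some k) :
    k0 ≤ k ∧ k < h.length ∧ h.getD j 0 = h.getD k 0 ∧
    (∀ m, k0 ≤ m → m < k → h.getD j 0 ≠ h.getD m 0) := by
  fun_induction scanK h j k0 with
  | case1 k0 hk heq =>
    simp only [Option.some.injEq] at hs
    subst hs
    exact ⟨Nat.le_refl _, hk, heq, fun m hm1 hm2 => absurd hm2 (by omega)⟩
  | case2 k0 hk hne ih =>
    obtain ⟨h1, h2, h3, h4⟩ := ih hs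
    refine ⟨by omega, h2, h3, fun m hm1 hm2 => ?_⟩
    rcases Nat.eq_or_lt_of_le hm1 with he | hl
    · rw [← he]; exact hne
    · exact h4 m (by omega) hm2
  | case3 k0 hk => simp at hs

theorem scanK_none (h : List Int) (j k0 : Nat) (hs : scanK h j k0 = none) :
    ∀ m, k0 ≤ m → m < h.length → h.getD j 0 ≠ h.getD m 0 := by
  fun_induction scanK h j k0 with
  | case1 k0 hk heq => simp at hs
  | case2 k0 hk hne ih =>
    intro m hm1 hm2
    rcases Nat.eq_or_lt_of_le hm1 with he | hl
    · rw [← he]; exact hne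
    · exact ih hs m (by omega) hm2
  | case3 k0 hk =>
    intro m hm1 hm2
    exact absurd hm2 (by omega)

theorem scanJ_some (h : List Int) (i j0 j k : Nat) (hs : scanJ h i j0 = some (j, k)) :
    j0 ≤ j ∧ j < k ∧ k < h.length ∧ h.getD i 0 = h.getD j 0 ∧ h.getD i 0 = h.getD k 0 ∧
    (∀ m, j0 ≤ m → m < j → h.getD i 0 ≠ h.getD m 0) ∧
    (∀ m, j < m → m < k → h.getD i 0 ≠ h.getD m 0) := by
  fun_induction scanJ h i j0 with
  | case1 j0 hj heq k' hk' =>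
    simp only [Option.some.injEq, Prod.mk.injEq] at hs
    obtain ⟨rfl, rfl⟩ := hs
    obtain ⟨h1, h2, h3, h4⟩ := scanK_some h j0 (j0 + 1) k' hk'
    refine ⟨Nat.le_refl _, by omega, h2, heq, heq.trans h3,
      fun m hm1 hm2 => absurd hm2 (by omega), fun m hm1 hm2 => ?_⟩
    rw [heq]
    exact h4 m (by omega) hm2
  | case2 j0 hj heq hk ih =>
    obtain ⟨h1, h2, h3, h4, h5, h6, h7⟩ := ih hs
    exact absurd (heq.symm.trans h4) (scanK_none h j0 (j0 + 1) hk j h1 (by omega))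
  | case3 j0 hj hne ih =>
    obtain ⟨h1, h2, h3, h4, h5, h6, h7⟩ := ih hs
    refine ⟨by omega, h2, h3, h4, h5, fun m hm1 hm2 => ?_, h7⟩
    rcases Nat.eq_or_lt_of_le hm1 with he | hl
    · rw [← he]; exact hne
    · exact h6 m (by omega) hm2
  | case4 j0 hj => simp at hs

theorem scanJ_none (h : List Int) (i j0 : Nat) (hs : scanJ h i j0 = none) :
    ∀ jj kk, j0 ≤ jj → jj < kk → kk < h.length →
      ¬ (h.getD i 0 = h.getD jj 0 ∧ h.getD i 0 = h.getD kk 0) := by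
  fun_induction scanJ h i j0 with
  | case1 j0 hj heq k' hk' => simp at hs
  | case2 j0 hj heq hk ih =>
    intro jj kk h1 h2 h3 he
    obtain ⟨e1, e2⟩ := he
    have hKn := scanK_none h j0 (j0 + 1) hk
    rcases Nat.eq_or_lt_of_le h1 with heq2 | hl
    · exact hKn kk (by omega) h3 ((heq.symm.trans e2))
    · exact hKn jj (by omega) (by omega) ((heq.symm.trans e1))
  | case3 j0 hj hne ih =>
    intro jj kk h1 h2 h3 he
    obtain ⟨e1, e2⟩ := he
    rcases Nat.eq_or_lt_of_le h1 with heq2 | hl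
    · exact hne (heq2 ▸ e1)
    · exact ih hs jj kk (by omega) h2 h3 ⟨e1, e2⟩
  | case4 j0 hj =>
    intro jj kk h1 h2 h3 he
    exact absurd h3 (by omega)

theorem scanI_some (h : List Int) (i0 i j k : Nat) (hs : scanI h i0 = some (i, j, k)) :
    i0 ≤ i ∧ i < j ∧ j < k ∧ k < h.length ∧
    h.getD i 0 = h.getD j 0 ∧ h.getD i 0 = h.getD k 0 ∧
    (∀ m, i < m → m < j → h.getD i 0 ≠ h.getD m 0) ∧
    (∀ m, j < m → m < k → h.getD i 0 ≠ h.getD m 0) ∧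
    (∀ m jj kk, i0 ≤ m → m < i → m < jj → jj < kk → kk < h.length →
      ¬ (h.getD m 0 = h.getD jj 0 ∧ h.getD m 0 = h.getD kk 0)) := by
  fun_induction scanI h i0 with
  | case1 i0 hi j' k' hJ =>
    simp only [Option.some.injEq, Prod.mk.injEq] at hs
    obtain ⟨rfl, rfl, rfl⟩ := hs
    obtain ⟨h1, h2, h3, h4, h5, h6, h7⟩ := scanJ_some h i0 (i0 + 1) j' k' hJ
    exact ⟨Nat.le_refl _, by omega, h2, h3, h4, h5,
      fun m hm1 hm2 => h6 m (by omega) hm2, h7,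
      fun m jj kk hm1 hm2 _ _ _ _ => absurd hm2 (by omega)⟩
  | case2 i0 hi hJ ih =>
    obtain ⟨h1, h2, h3, h4, h5, h6, h7, h8, h9⟩ := ih hs
    refine ⟨by omega, h2, h3, h4, h5, h6, h7, h8, fun m jj kk hm1 hm2 hjj hkk hlen hp => ?_⟩
    rcases Nat.eq_or_lt_of_le hm1 with heq2 | hl
    · exact scanJ_none h i0 (i0 + 1) hJ jj kk (by omega) hkk hlen (heq2 ▸ hp)
    · exact h9 m jj kk (by omega) hm2 hjj hkk hlen hp
  | case3 i0 hi => simp at hs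

theorem scanI_none (h : List Int) (i0 : Nat) (hs : scanI h i0 = none) :
    ∀ m jj kk, i0 ≤ m → m < jj → jj < kk → kk < h.length →
      ¬ (h.getD m 0 = h.getD jj 0 ∧ h.getD m 0 = h.getD kk 0) := by
  fun_induction scanI h i0 with
  | case1 i0 hi j' k' hJ => simp at hs
  | case2 i0 hi hJ ih =>
    intro m jj kk h1 h2 h3 h4 hp
    rcases Nat.eq_or_lt_of_le h1 with heq2 | hl
    · exact scanJ_none h i0 (i0 + 1) hJ jj kk (by omega) h3 h4 (heq2 ▸ hp)
    · exact ih hs m jj kk (by omega) h2 h3 h4 hp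
  | case3 i0 hi =>
    intro m jj kk h1 h2 h3 h4 hp
    exact absurd h4 (by omega)

theorem erase_at (p : List Int) (x : Int) (q : List Int) :
    (p ++ x :: q).eraseIdx p.length = p ++ q := by
  rw [List.eraseIdx_append_of_length_le (Nat.le_refl _), Nat.sub_self]
  rfl

theorem erase3 (A b1 b3 Y : List Int) (v : Int) (i j k : Nat)
    (hA : A.length = i) (hb1 : b1.length = j - i - 1) (hb3 : b3.length = k - j - 1)
    (hij : i < j) (hjk : j < k) :
    (((A ++ v :: (b1 ++ v :: (b3 ++ v :: Y))).eraseIdx i).eraseIdx (j - 1)).eraseIdx (k - 2)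
      = A ++ (b1 ++ (b3 ++ Y)) := by
  have e1 : (A ++ v :: (b1 ++ v :: (b3 ++ v :: Y))).eraseIdx i
      = A ++ (b1 ++ v :: (b3 ++ v :: Y)) := by
    rw [← hA, erase_at]
  rw [e1]
  have r2 : A ++ (b1 ++ v :: (b3 ++ v :: Y)) = (A ++ b1) ++ v :: (b3 ++ v :: Y) := by
    simp
  have e2 : (A ++ (b1 ++ v :: (b3 ++ v :: Y))).eraseIdx (j - 1)
      = (A ++ b1) ++ (b3 ++ v :: Y) := by
    rw [r2, show j - 1 = (A ++ b1).length from by simp [hA, hb1]; omega, erase_at]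
  rw [e2]
  have r3 : (A ++ b1) ++ (b3 ++ v :: Y) = ((A ++ b1) ++ b3) ++ v :: Y := by simp
  rw [r3, show k - 2 = ((A ++ b1) ++ b3).length from by simp [hA, hb1, hb3]; omega, erase_at]
  simp

theorem decomp (h : List Int) (i j k : Nat) (hij : i < j) (hjk : j < k) (hk : k < h.length)
    (hvj : h.getD i 0 = h.getD j 0) (hvk : h.getD i 0 = h.getD k 0)
    (S3 : ∀ m, i < m → m < j → h.getD i 0 ≠ h.getD m 0)
    (S4 : ∀ m, j < m → m < k → h.getD i 0 ≠ h.getD m 0) :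
    ∃ A b1 b3 Y, h = A ++ h.getD i 0 :: (b1 ++ h.getD i 0 :: (b3 ++ h.getD i 0 :: Y)) ∧
      A = h.take i ∧
      h.getD i 0 ∉ b1 ∧ h.getD i 0 ∉ b3 ∧
      A.length = i ∧ b1.length = j - i - 1 ∧ b3.length = k - j - 1 := by
  have hi : i < h.length := by omega
  have hj : j < h.length := by omega
  refine ⟨h.take i, (h.drop (i + 1)).take (j - i - 1), (h.drop (j + 1)).take (k - j - 1),
    h.drop (k + 1), ?_, rfl, ?_, ?_, ?_, ?_, ?_⟩
  · conv_lhs => rw [← List.take_append_drop i h]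
    congr 1
    rw [List.drop_eq_getElem_cons hi, ← List.getD_eq_getElem h 0 hi]
    congr 1
    conv_lhs => rw [← List.take_append_drop (j - i - 1) (h.drop (i + 1))]
    congr 1
    rw [List.drop_drop, show i + 1 + (j - i - 1) = j from by omega]
    rw [List.drop_eq_getElem_cons hj, ← List.getD_eq_getElem h 0 hj, ← hvj]
    congr 1
    conv_lhs => rw [← List.take_append_drop (k - j - 1) (h.drop (j + 1))]
    congr 1
    rw [List.drop_drop, show j + 1 + (k - j - 1) = k from by omega]
    rw [List.drop_eq_getElem_cons hk, ← List.getD_eq_getElem h 0 hk, ← hvk]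
  · intro hmem
    obtain ⟨p, hp, he⟩ := List.mem_iff_getElem.mp hmem
    have hp' : p < j - i - 1 := by
      simp [List.length_take, List.length_drop] at hp
      omega
    rw [List.getElem_take, List.getElem_drop] at he
    refine S3 (i + 1 + p) (by omega) (by omega) ?_
    rw [List.getD_eq_getElem h 0 (show i + 1 + p < h.length from by omega)]
    exact he.symm
  · intro hmem
    obtain ⟨p, hp, he⟩ := List.mem_iff_getElem.mp hmem
    have hp' : p < k - j - 1 := by
      simp [List.length_take, List.length_drop] at hp
      omega
    rw [List.getElem_take, List.getElem_drop] at he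
    refine S4 (j + 1 + p) (by omega) (by omega) ?_
    rw [List.getD_eq_getElem h 0 (show j + 1 + p < h.length from by omega)]
    exact he.symm
  · simp [List.length_take]; omega
  · simp [List.length_take, List.length_drop]; omega
  · simp [List.length_take, List.length_drop]; omega

theorem koLoop_eq : ∀ (n : Nat) (h : List Int) (t : List (List Int)), h.length ≤ n →
    koLoop h t = (t ++ (G h).1, (G h).2) := by
  intro n
  induction n with
  | zero =>
    intro h t hlen
    have hnil : h = [] := List.length_eq_zero_iff.mp (by omega)
    subst hnil
    rw [koLoop]
    split
    case h_1 i j k heq2 =>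
      have hlt := scanI_fst_lt [] 0 i j k heq2
      simp at hlt
    case h_2 heq2 => simp [G, goB]
  | succ n ih =>
    intro h t hlen
    rw [koLoop]
    split
    case h_1 i j k heq =>
      obtain ⟨_, hij, hjk, hk, hvj, hvk, S3, S4, S2⟩ := scanI_some h 0 i j k heq
      obtain ⟨A, b1, b3, Y, hshape, hAtake, hnb1, hnb3, hA, hb1, hb3⟩ :=
        decomp h i j k hij hjk hk hvj hvk S3 S4
      have hb' : remN (h.getD i 0) 2 (b1 ++ h.getD i 0 :: (b3 ++ h.getD i 0 :: Y))
          = b1 ++ (b3 ++ Y) := by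
        rw [remN_skip _ 1 b1 _ hnb1, remN_skip _ 0 b3 Y hnb3, remN_zero]
      have her : ((h.eraseIdx i).eraseIdx (j - 1)).eraseIdx (k - 2)
          = A ++ (b1 ++ (b3 ++ Y)) := by
        conv_lhs => rw [hshape]
        exact erase3 A b1 b3 Y (h.getD i 0) i j k hA hb1 hb3 hij hjk
      -- hypotheses for main_step
      have nva : h.getD i 0 ∉ A := by
        intro hmem
        rw [hAtake] at hmem
        obtain ⟨p, hp, he⟩ := List.mem_iff_getElem.mp hmem
        have hpi : p < i := by simp [List.length_take] at hp; omega
        rw [List.getElem_take] at he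
        have hgp : h.getD p 0 = h.getD i 0 := by
          rw [List.getD_eq_getElem h 0 (show p < h.length from by omega)]
          exact he
        exact S2 p j k (Nat.zero_le _) hpi (by omega) hjk hk ⟨hgp.trans hvj, hgp.trans hvk⟩
      have nha : ∀ w ∈ A, (A ++ h.getD i 0 :: (b1 ++ h.getD i 0 :: (b3 ++ h.getD i 0 :: Y))).count w < 3 := by
        intro w hw
        rw [← hshape]
        by_contra hge
        rw [hAtake] at hw
        obtain ⟨p, hp, he⟩ := List.mem_iff_getElem.mp hw
        have hpi : p < i := by simp [List.length_take] at hp; omega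
        rw [List.getElem_take] at he
        have hgp : h.getD p 0 = w := by
          rw [List.getD_eq_getElem h 0 (show p < h.length from by omega)]
          exact he
        obtain ⟨m1, m2, m3, h12, h23, hm3, e1, e2, e3⟩ :=
          exists3_of_count h w (by omega)
        by_cases hcmp : m1 ≤ p
        · exact S2 m1 m2 m3 (Nat.zero_le _) (by omega) h12 h23 hm3
            ⟨e1.trans e2.symm, e1.trans e3.symm⟩
        · exact S2 p m1 m2 (Nat.zero_le _) hpi (by omega) h12 (by omega)
            ⟨hgp.trans e1.symm, hgp.trans e2.symm⟩
      have nhv : 3 ≤ (A ++ h.getD i 0 :: (b1 ++ h.getD i 0 :: (b3 ++ h.getD i 0 :: Y))).count (h.getD i 0) := by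
        simp [List.count_append, List.count_cons_self]
        omega
      have hms := main_step A (b1 ++ h.getD i 0 :: (b3 ++ h.getD i 0 :: Y)) (h.getD i 0)
        nva nha nhv
      rw [hb'] at hms
      have hGh : G h = ([h.getD i 0, h.getD i 0, h.getD i 0] :: (G (A ++ (b1 ++ (b3 ++ Y)))).1,
          (G (A ++ (b1 ++ (b3 ++ Y)))).2) := by
        conv_lhs => rw [hshape]
        exact hms
      rw [her, ih _ _ (by
        have e := congrArg List.length hshape
        rw [List.length_append] at e
        simp only [List.length_cons, List.length_append] at e
        simp only [List.length_append]
        omega), ← hvj, ← hvk, hGh]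
      simp
    case h_2 heq =>
      have hno : ∀ w, h.count w < 3 := by
        intro w
        by_contra hge
        obtain ⟨m1, m2, m3, h12, h23, hm3, e1, e2, e3⟩ :=
          exists3_of_count h w (by omega)
        exact scanI_none h 0 heq m1 m2 m3 (Nat.zero_le _) h12 h23 hm3
          ⟨e1.trans e2.symm, e1.trans e3.symm⟩
      have hG : G h = ([], h) := goB_amari _ h _ (fun w _ => hno w)
      rw [hG]
      simp

-- bridge from port B's folds to goB
theorem foldB (td : PySem.Dict Int Int) (T : Int → Nat)
    (hT : ∀ w, td.getD w 0 = ((T w : Nat) : Int)) :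
    ∀ (b : List Int) (trip : List (List Int)) (am : List Int) (d : PySem.Dict Int Int)
      (c : Int → Nat), (∀ w, d.getD w 0 = ((c w : Nat) : Int)) →
    (List.foldl (bStep td) (trip, am, d) b).1 = trip ++ (goB T c b).1 ∧
    (List.foldl (bStep td) (trip, am, d) b).2.1 = am ++ (goB T c b).2 := by
  intro b
  induction b with
  | nil => intro trip am d c hd; simp [goB]
  | cons v b ih =>
    intro trip am d c hd
    have hfd : PySem.Int.floordiv (td.getD v 0) 3 = ((T v / 3 : Nat) : Int) := by
      rw [hT v]
      exact_mod_cast PySem.Int.floordiv_natCast (T v) 3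
    have hcond : (d.getD v 0 < 3 * PySem.Int.floordiv (td.getD v 0) 3) ↔ (c v < 3 * (T v / 3)) := by
      rw [hd v, hfd]
      constructor <;> intro hh <;> exact_mod_cast hh
    have hmod : (PySem.Int.mod (d.getD v 0) 3 = 0) ↔ (c v % 3 = 0) := by
      rw [hd v, show (3 : Int) = ((3 : Nat) : Int) from rfl, PySem.Int.mod_natCast]
      constructor <;> intro hh <;> exact_mod_cast hh
    have hd' : ∀ w, (d.insert v (d.getD v 0 + 1)).getD w 0 = ((bump c v w : Nat) : Int) := by
      intro w
      rw [PySem.Dict.getD_insert]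
      by_cases hw : w = v
      · rw [if_pos hw, hd v, hw, bump_self]
        push_cast
        ring
      · rw [if_neg hw, hd w, bump_ne _ _ _ hw]
    rw [List.foldl_cons]
    by_cases hc1 : c v < 3 * (T v / 3)
    · by_cases hc2 : c v % 3 = 0
      · have hstep : bStep td (trip, am, d) v = (trip ++ [[v, v, v]], am, d.insert v (d.getD v 0 + 1)) := by
          simp only [bStep]
          rw [if_pos (hcond.mpr hc1), if_pos (hmod.mpr hc2)]
        rw [hstep]
        obtain ⟨e1, e2⟩ := ih (trip ++ [[v, v, v]]) am _ (bump c v) hd'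
        constructor
        · rw [e1]
          simp only [goB, if_pos hc1, if_pos hc2]
          simp
        · rw [e2]
          simp only [goB, if_pos hc1, if_pos hc2]
      · have hstep : bStep td (trip, am, d) v = (trip, am, d.insert v (d.getD v 0 + 1)) := by
          simp only [bStep]
          rw [if_pos (hcond.mpr hc1), if_neg (fun hh => hc2 (hmod.mp hh))]
        rw [hstep]
        obtain ⟨e1, e2⟩ := ih trip am _ (bump c v) hd'
        constructor
        · rw [e1]; simp only [goB, if_pos hc1, if_neg hc2]
        · rw [e2]; simp only [goB, if_pos hc1, if_neg hc2]
    · have hstep : bStep td (trip, am, d) v = (trip, am ++ [v], d.insert v (d.getD v 0 + 1)) := by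
        simp only [bStep]
        rw [if_neg (fun hh => hc1 (hcond.mp hh))]
      rw [hstep]
      obtain ⟨e1, e2⟩ := ih trip (am ++ [v]) _ (bump c v) hd'
      constructor
      · rw [e1]; simp only [goB, if_neg hc1]
      · rw [e2]
        simp only [goB, if_neg hc1]
        simp

theorem alt_eq_G (tlist : List Int) : ko_serch_alt tlist = G tlist := by
  have htot : ∀ w, (tlist.foldl (fun d v => d.insert v (d.getD v 0 + 1))
      (PySem.Dict.empty : PySem.Dict Int Int)).getD w 0 = ((tlist.count w : Nat) : Int) := by
    intro w
    rw [PySem.Dict.foldl_insert_getD_add_one_eq_counter, PySem.Dict.getD_counter]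
  have hd0 : ∀ w, (PySem.Dict.empty : PySem.Dict Int Int).getD w 0
      = ((((fun _ => 0) : Int → Nat) w : Nat) : Int) := by
    intro w
    rw [PySem.Dict.getD_empty]
    rfl
  obtain ⟨e1, e2⟩ := foldB _ (fun w => tlist.count w) htot tlist [] [] PySem.Dict.empty
    (fun _ => 0) hd0
  show ((tlist.foldl (bStep _) ([], [], PySem.Dict.empty)).1,
    (tlist.foldl (bStep _) ([], [], PySem.Dict.empty)).2.1) = G tlist
  rw [e1, e2]
  rfl

-- ===== VERDICT (by name: the statement is the Claim_ definition above) =====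
theorem ko_serch_spec : Claim_equal_ko_serch := by
  intro tlist _
  show ko_serch tlist = ko_serch_alt tlist
  rw [alt_eq_G]
  show koLoop tlist [] = G tlist
  rw [koLoop_eq tlist.length tlist [] (Nat.le_refl _)]
  simp
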